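-- pv_equiv track=rewrite | github.com/Soborief/AdventOfCode | repo1.py | what_distance
-- ===== SOURCE A (Python) =====
-- def what_distance(list1,list2):
--     distance =[]
--     total=0
--     for i in range(len(list1)):
--         for n in range(len(list1)-i-1):
--
--             if  list1[n] > list1[n+1]:
--                 list1[n], list1[n+1] = list1[n+1], list1[n]
--
--
--     for i in range(len(list2)):
--         for n in range(len(list2)-i-1):
--
--             if  list2[n] > list2[n+1]:
--                 list2[n], list2[n+1] = list2[n+1], list2[n]
--
--
--     for i in range(len(list2)):
--         distance.append(list1[i] - list2[i])
--
--
--     for i in range(len(distance)):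
--         total+=distance[i]
--
--     return total
-- ===== SOURCE B (Python) =====
-- def what_distance(list1, list2):
--     # Sum of element-wise differences of the two sorted lists equals
--     # sum of the smallest len(list2) elements of list1 minus sum(list2)
--     # (order of list2 is irrelevant to its sum). O(n log n) vs A's O(n^2),
--     # and does not mutate its arguments (A bubble-sorts both in place).
--     return sum(sorted(list1)[:len(list2)]) - sum(list2)
-- ===== Notes on version B (the rewrite author's own statement) =====
-- stated objective: faster
-- what changed: Replaces the two hand-written in-place bubble sorts plus two index loops by a single expression: sum of the smallest len(list2) elements of list1 (library sort + slice) minus sum(list2), which is the value A computes; B also leaves both argument lists unmutated.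
import Mathlib
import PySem

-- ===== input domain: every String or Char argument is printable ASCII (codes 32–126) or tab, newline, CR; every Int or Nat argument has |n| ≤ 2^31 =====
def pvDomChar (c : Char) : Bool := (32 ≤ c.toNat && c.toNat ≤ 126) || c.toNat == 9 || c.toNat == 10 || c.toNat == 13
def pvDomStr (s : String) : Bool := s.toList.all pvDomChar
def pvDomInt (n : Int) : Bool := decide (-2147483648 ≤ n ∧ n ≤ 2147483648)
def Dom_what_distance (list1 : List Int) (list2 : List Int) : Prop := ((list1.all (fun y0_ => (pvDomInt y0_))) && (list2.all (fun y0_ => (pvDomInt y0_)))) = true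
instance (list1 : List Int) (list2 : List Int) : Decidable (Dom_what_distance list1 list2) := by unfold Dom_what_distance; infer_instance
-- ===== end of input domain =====

-- B replaces A's two in-place O(n^2) bubble sorts and two index loops by
-- sum(sorted(list1)[:len(list2)]) - sum(list2) (faster, asymptotic); the equivalence
-- proved is about the RETURN value only: A mutates (sorts) both argument lists in place, B does not.

-- ===== PORT A =====
-- one comparison/swap step of A's bubble sort:  if l[n] > l[n+1]: l[n], l[n+1] = l[n+1], l[n]
def pvSwapStep (l : List Int) (n : Int) : List Int :=
  if PySem.List.pyGetD l n 0 > PySem.List.pyGetD l (n + 1) 0 then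
    PySem.List.pySetD (PySem.List.pySetD l n (PySem.List.pyGetD l (n + 1) 0)) (n + 1)
      (PySem.List.pyGetD l n 0)
  else l

-- A's identical nested sorting loops, applied to each list (len(list) is invariant under the swaps)
def pvBubble (l0 : List Int) : List Int :=
  (PySem.List.pyRange 0 (l0.length : Int) 1).foldl (fun l i =>
    (PySem.List.pyRange 0 ((l0.length : Int) - i - 1) 1).foldl pvSwapStep l) l0

def what_distance (list1 : List Int) (list2 : List Int) : Int :=
  let l1 := pvBubble list1
  let l2 := pvBubble list2
  let distance := (PySem.List.pyRange 0 (l2.length : Int) 1).foldl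
    (fun d i => d ++ [PySem.List.pyGetD l1 i 0 - PySem.List.pyGetD l2 i 0]) ([] : List Int)
  (PySem.List.pyRange 0 (distance.length : Int) 1).foldl
    (fun total i => total + PySem.List.pyGetD distance i 0) 0

-- ===== PORT B =====
def what_distance_alt (list1 : List Int) (list2 : List Int) : Int :=
  (PySem.List.slice (PySem.List.sorted list1 (fun x => x) false) none
      (some (list2.length : Int))).sum - list2.sum

-- ===== PRECONDITION & SPEC =====
-- A indexes list1[i] for i < len(list2): IndexError (excluded) iff len(list2) > len(list1)
def Pre_what_distance (list1 : List Int) (list2 : List Int) : Prop :=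
  list2.length ≤ list1.length
instance (list1 : List Int) (list2 : List Int) : Decidable (Pre_what_distance list1 list2) := by
  unfold Pre_what_distance; infer_instance

def pvWitness_what_distance : List Int × List Int := ([3, 1, 2], [2, 1, 1])

def Spec_what_distance (list1 : List Int) (list2 : List Int) (out : Int) : Prop :=
  out = what_distance_alt list1 list2
instance (list1 : List Int) (list2 : List Int) (out : Int) :
    Decidable (Spec_what_distance list1 list2 out) := by
  unfold Spec_what_distance; infer_instance

-- ===== CLAIM (what is proved, stated in full; the proofs are below) =====
def Claim_equal_what_distance : Prop := ∀ (list1 : List Int) (list2 : List Int),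
  Dom_what_distance list1 list2 → Pre_what_distance list1 list2 →
    Spec_what_distance list1 list2 (what_distance list1 list2)

-- ===== LEMMAS AND PROOFS =====

-- structural single bubble pass (comparisons at positions 0,1,…, left to right)
def bpass : List Int → List Int
  | [] => []
  | [a] => [a]
  | a :: b :: t => if b < a then b :: bpass (a :: t) else a :: bpass (b :: t)

lemma bpass_perm : ∀ l : List Int, (bpass l).Perm l := by
  intro l
  induction l using bpass.induct with
  | case1 => simp [bpass]
  | case2 a => simp [bpass]
  | case3 a b t h ih =>
      simp only [bpass, if_pos h]
      exact (ih.cons b).trans (List.Perm.swap a b t)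
  | case4 a b t h ih =>
      simp only [bpass, if_neg h]
      exact ih.cons a

lemma bpass_length (l : List Int) : (bpass l).length = l.length :=
  (bpass_perm l).length_eq

-- a pass on xs ++ [y]: run the pass on xs, then compare/swap its last element with y
lemma bpass_snoc : ∀ (xs : List Int), xs ≠ [] → ∀ y : Int,
    ∃ zs z, bpass xs = zs ++ [z] ∧
      bpass (xs ++ [y]) = if y < z then zs ++ [y, z] else zs ++ [z, y] := by
  intro xs
  induction xs using bpass.induct with
  | case1 => intro h; exact absurd rfl h
  | case2 a =>
      intro _ y
      refine ⟨[], a, by simp [bpass], ?_⟩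
      by_cases hy : y < a <;> simp [bpass, hy]
  | case3 a b t h ih =>
      intro _ y
      obtain ⟨zs, z, h1, h2⟩ := ih (by simp) y
      simp only [List.cons_append] at h2
      refine ⟨b :: zs, z, by simp [bpass, h, h1], ?_⟩
      simp only [List.cons_append, bpass, if_pos h, h2]
      by_cases hy : y < z <;> simp [hy]
  | case4 a b t h ih =>
      intro _ y
      obtain ⟨zs, z, h1, h2⟩ := ih (by simp) y
      simp only [List.cons_append] at h2
      refine ⟨a :: zs, z, by simp [bpass, h, h1], ?_⟩
      simp only [List.cons_append, bpass, if_neg h, h2]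
      by_cases hy : y < z <;> simp [hy]

-- the last element of a pass dominates the rest of its output
lemma bpass_last : ∀ (l : List Int), l ≠ [] →
    ∃ zs z, bpass l = zs ++ [z] ∧ ∀ x ∈ zs, x ≤ z := by
  intro l
  induction l using bpass.induct with
  | case1 => intro h; exact absurd rfl h
  | case2 a => intro _; exact ⟨[], a, by simp [bpass], by simp⟩
  | case3 a b t h ih =>
      intro _
      obtain ⟨zs, z, h1, h2⟩ := ih (by simp)
      refine ⟨b :: zs, z, by simp [bpass, h, h1], ?_⟩
      intro x hx
      rcases List.mem_cons.mp hx with rfl | hx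
      · have ha : a ∈ zs ++ [z] := h1 ▸ (bpass_perm (a :: t)).mem_iff.mpr (by simp)
        rcases List.mem_append.mp ha with ha | ha
        · exact le_of_lt (lt_of_lt_of_le h (h2 a ha))
        · simp at ha; omega
      · exact h2 x hx
  | case4 a b t h ih =>
      intro _
      obtain ⟨zs, z, h1, h2⟩ := ih (by simp)
      refine ⟨a :: zs, z, by simp [bpass, h, h1], ?_⟩
      intro x hx
      rcases List.mem_cons.mp hx with rfl | hx
      · have hb : b ∈ zs ++ [z] := h1 ▸ (bpass_perm (b :: t)).mem_iff.mpr (by simp)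
        rcases List.mem_append.mp hb with hb | hb
        · exact le_trans (not_lt.mp h) (h2 b hb)
        · simp at hb; omega
      · exact h2 x hx

-- A's swap step at the boundary between a prefix and the rest of the list
lemma swapStep_boundary (zs : List Int) (z d : Int) (D : List Int) :
    pvSwapStep (zs ++ z :: d :: D) ((zs.length : Int)) =
      if d < z then zs ++ d :: z :: D else zs ++ z :: d :: D := by
  have e1 : PySem.List.pyGetD (zs ++ z :: d :: D) (zs.length : Int) 0 = z := by
    rw [PySem.List.pyGetD_natCast]
    simp [List.getD_eq_getElem?_getD]
  have ecast : ((zs.length : Int) + 1) = ((zs.length + 1 : Nat) : Int) := by push_cast; ring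
  have e2 : PySem.List.pyGetD (zs ++ z :: d :: D) ((zs.length : Int) + 1) 0 = d := by
    rw [ecast, PySem.List.pyGetD_natCast]
    simp [List.getD_eq_getElem?_getD]
  unfold pvSwapStep
  rw [e1, e2]
  by_cases hdz : d < z
  · rw [if_pos (by omega)]
    rw [PySem.List.pySetD_natCast, ecast, PySem.List.pySetD_natCast]
    rw [if_pos hdz]
    rw [List.set_append_right _ _ (by omega), List.set_append_right _ _ (by omega)]
    simp
  · rw [if_neg (by omega), if_neg hdz]

-- A's inner loop with bound k performs one bubble pass over the first k+1 elements
lemma inner_eq_bpass : ∀ (k : Nat) (l : List Int), k + 1 ≤ l.length →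
    (PySem.List.pyRange 0 (k : Int) 1).foldl pvSwapStep l =
      bpass (l.take (k + 1)) ++ l.drop (k + 1) := by
  intro k
  induction k with
  | zero =>
      intro l hl
      match l, hl with
      | a :: t, _ =>
          simp only [Nat.cast_zero]
          rw [show PySem.List.pyRange 0 (0 : Int) 1 = [] from rfl]
          simp [bpass]
  | succ k ih =>
      intro l hl
      have hk1 : k + 1 < l.length := by omega
      have h1 : (PySem.List.pyRange 0 ((k : Int) + 1) 1) = PySem.List.pyRange 0 (k : Int) 1 ++ [(k : Int)] :=
        PySem.List.pyRange_one_succ_right (by omega)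
      have hcast : ((k + 1 : Nat) : Int) = (k : Int) + 1 := by push_cast; ring
      rw [hcast, h1, List.foldl_append]
      rw [ih l (by omega)]
      have htk : l.take (k + 1) ≠ [] := by
        have h : (l.take (k + 1)).length = k + 1 := by rw [List.length_take]; omega
        intro hh; rw [hh] at h; simp at h
      have hget : l.drop (k + 1) = l[k + 1] :: l.drop (k + 2) := List.drop_eq_getElem_cons hk1
      obtain ⟨zs, z, hzs, hsnoc⟩ := bpass_snoc (l.take (k + 1)) htk (l[k + 1])
      have hzslen : zs.length = k := by
        have h := bpass_length (l.take (k + 1))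
        rw [hzs] at h; simp [List.length_take] at h; omega
      have htk2 : l.take (k + 2) = l.take (k + 1) ++ [l[k + 1]] := by
        rw [List.take_add_one, List.getElem?_eq_getElem hk1]
        rfl
      simp only [List.foldl_cons, List.foldl_nil]
      rw [hzs, hget, List.append_assoc, List.singleton_append]
      rw [show (k : Int) = (zs.length : Int) by rw [hzslen]]
      rw [swapStep_boundary]
      rw [htk2, hsnoc]
      by_cases hy : l[k + 1] < z
      · rw [if_pos hy, if_pos hy]; simp
      · rw [if_neg hy, if_neg hy]; simp

-- the sequence of shrinking passes, structurally
def sortAux : Nat → List Int → List Int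
  | 0, l => l
  | k + 1, l => sortAux k (bpass (l.take (k + 1)) ++ l.drop (k + 1))

lemma sortAux_perm : ∀ (k : Nat) (l : List Int), (sortAux k l).Perm l := by
  intro k
  induction k with
  | zero => intro l; simp [sortAux]
  | succ k ih =>
      intro l
      have hp : (bpass (l.take (k + 1)) ++ l.drop (k + 1)).Perm l := by
        have h := (bpass_perm (l.take (k + 1))).append_right (l.drop (k + 1))
        rwa [List.take_append_drop] at h
      exact (ih _).trans hp

lemma sortAux_sorted : ∀ (k : Nat) (l : List Int), k ≤ l.length →
    (l.drop k).Pairwise (· ≤ ·) → (∀ x ∈ l.take k, ∀ y ∈ l.drop k, x ≤ y) →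
    (sortAux k l).Pairwise (· ≤ ·) := by
  intro k
  induction k with
  | zero => intro l _ hs _; simpa using hs
  | succ k ih =>
      intro l hk hs hle
      have htk : l.take (k + 1) ≠ [] := by
        have h : (l.take (k + 1)).length = k + 1 := by rw [List.length_take]; omega
        intro hh; rw [hh] at h; simp at h
      obtain ⟨zs, z, hzs, hdom⟩ := bpass_last (l.take (k + 1)) htk
      have hmem : ∀ x ∈ zs ++ [z], x ∈ l.take (k + 1) := by
        intro x hx
        exact (bpass_perm (l.take (k + 1))).mem_iff.mp (hzs ▸ hx)
      have hzslen : zs.length = k := by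
        have h := bpass_length (l.take (k + 1))
        rw [hzs] at h; simp [List.length_take] at h; omega
      show (sortAux k (bpass (l.take (k + 1)) ++ l.drop (k + 1))).Pairwise (· ≤ ·)
      rw [hzs, List.append_assoc, List.singleton_append]
      set l' := zs ++ z :: l.drop (k + 1) with hl'
      have hlen' : l'.length = l.length := by
        simp [hl', List.length_drop]; omega
      have hdk : l'.drop k = z :: l.drop (k + 1) := by
        rw [hl', List.drop_append_of_le_length (by omega), ← hzslen]
        simp
      have htk' : l'.take k = zs := by
        rw [hl', ← hzslen, List.take_left]
      apply ih l' (by omega)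
      · rw [hdk]
        refine List.Pairwise.cons ?_ hs
        intro y hy
        exact hle z (hmem z (by simp)) y hy
      · intro x hx y hy
        rw [htk'] at hx
        rw [hdk] at hy
        rcases List.mem_cons.mp hy with rfl | hy
        · exact hdom x hx
        · exact hle x (hmem x (by simp [hx])) y hy

lemma pvBubble_eq_sortAux (l0 : List Int) : pvBubble l0 = sortAux l0.length l0 := by
  have aux : ∀ (j : Nat) (a : Int) (l : List Int), a = (l0.length : Int) - j →
      l.length = l0.length → j ≤ l0.length →
      (PySem.List.pyRange a (l0.length : Int) 1).foldl
        (fun l i => (PySem.List.pyRange 0 ((l0.length : Int) - i - 1) 1).foldl pvSwapStep l) l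
        = sortAux j l := by
    intro j
    induction j with
    | zero =>
        intro a l ha _ _
        rw [ha]
        rw [show ((l0.length : Int) - (0 : Nat)) = (l0.length : Int) by push_cast; ring]
        rw [show PySem.List.pyRange (l0.length : Int) (l0.length : Int) 1 = [] from
          PySem.List.pyRange_one_eq_nil (le_refl _)]
        simp [sortAux]
    | succ j ih =>
        intro a l ha hlen hj
        rw [PySem.List.pyRange_one_cons (by push_cast at ha ⊢; omega)]
        simp only [List.foldl_cons]
        have hb : (l0.length : Int) - a - 1 = (j : Int) := by push_cast at ha ⊢; omega
        rw [hb]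
        rw [inner_eq_bpass j l (by omega)]
        rw [ih (a + 1) (bpass (l.take (j + 1)) ++ l.drop (j + 1))
          (by push_cast at ha ⊢; omega)
          (by rw [List.length_append, bpass_length, List.length_take, List.length_drop]; omega)
          (by omega)]
        rfl
  unfold pvBubble
  exact aux l0.length 0 l0 (by ring) rfl (le_refl _)

lemma pvBubble_eq_sorted (l : List Int) :
    pvBubble l = PySem.List.sorted l (fun x => x) false := by
  rw [pvBubble_eq_sortAux]
  refine (PySem.List.sorted_id_eq_of_perm_of_pairwise l (sortAux l.length l)
    (sortAux_perm _ _) ?_).symm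
  apply sortAux_sorted
  · exact le_refl _
  · simp
  · simp

lemma sum_map_sub_int (f g : Int → Int) (xs : List Int) :
    (xs.map (fun i => f i - g i)).sum = (xs.map f).sum - (xs.map g).sum := by
  induction xs with
  | nil => simp
  | cons a t ih => simp [ih]; ring

-- ===== VERDICT (by name: the statement is the Claim_ definition above) =====
theorem what_distance_spec : Claim_equal_what_distance := by
  intro list1 list2 _ hpre
  unfold Pre_what_distance at hpre
  unfold Spec_what_distance what_distance what_distance_alt
  dsimp only
  rw [pvBubble_eq_sorted list1, pvBubble_eq_sorted list2]
  set L1 := PySem.List.sorted list1 (fun x => x) false with hL1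
  set L2 := PySem.List.sorted list2 (fun x => x) false with hL2
  have hlen1 : L1.length = list1.length := PySem.List.length_sorted _ _ _
  have hlen2 : L2.length = list2.length := PySem.List.length_sorted _ _ _
  rw [PySem.List.foldl_append_singleton_eq_map, List.nil_append]
  set D := (PySem.List.pyRange 0 (L2.length : Int) 1).map
    (fun i => PySem.List.pyGetD L1 i 0 - PySem.List.pyGetD L2 i 0) with hD
  have htot : (PySem.List.pyRange 0 (D.length : Int) 1).foldl
      (fun total i => total + PySem.List.pyGetD D i 0) 0 = D.sum := by
    have h := PySem.List.foldl_pyRange_pyGetD D 0 (fun acc x => acc + x) 0 (le_refl 0)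
    simpa [List.sum_eq_foldl] using h
  rw [htot, hD, sum_map_sub_int]
  have hmap2 : (PySem.List.pyRange 0 (L2.length : Int) 1).map
      (fun i => PySem.List.pyGetD L2 i 0) = L2 :=
    PySem.List.map_pyGetD_pyRange_zero L2 0
  have hTlen : (L1.take list2.length).length = list2.length := by
    rw [List.length_take]; omega
  have hmap1 : (PySem.List.pyRange 0 (L2.length : Int) 1).map
      (fun i => PySem.List.pyGetD L1 i 0) = L1.take list2.length := by
    have hcong : ∀ i ∈ PySem.List.pyRange 0 (L2.length : Int) 1,
        PySem.List.pyGetD L1 i 0 = PySem.List.pyGetD (L1.take list2.length) i 0 := by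
      intro i hi
      obtain ⟨h0i, hib⟩ := PySem.List.mem_pyRange_one.mp hi
      rw [PySem.List.pyGetD_of_nonneg _ _ h0i, PySem.List.pyGetD_of_nonneg _ _ h0i]
      have hit : i.toNat < list2.length := by omega
      rw [List.getD_eq_getElem?_getD, List.getD_eq_getElem?_getD, List.getElem?_take,
        if_pos hit]
    rw [List.map_congr_left hcong]
    have h := PySem.List.map_pyGetD_pyRange_zero (L1.take list2.length) 0
    have hlen' : PySem.List.len (L1.take list2.length) = ((L2.length : Int)) := by
      show ((L1.take list2.length).length : Int) = (L2.length : Int)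
      rw [hTlen, hlen2]
    rw [hlen'] at h
    exact h
  rw [hmap1, hmap2]
  rw [PySem.List.slice_to_natCast]
  rw [(PySem.List.sorted_perm list2 (fun x => x) false).sum_eq]
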